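-- pv_equiv track=rewrite | github.com/windfall-shogi/atcoder_cpp | abc129/f/test.py | f
-- ===== SOURCE A (Python) =====
-- def pow_(x, p, m):
--     a = 1
--     for _ in range(p):
--         a *= x % m
--         a %= m
--     return a
--
-- def f(n, base, m):
--     if n == 0:
--         return 0
--     elif n % 2 == 1:
--         tmp = f(n - 1, base, m)
--         return (tmp * base + 1) % m
--     else:
--         tmp = f(n // 2, base, m)
--         return (tmp * pow_(base, n // 2, m) + tmp) % m
-- ===== SOURCE B (Python) =====
-- def f(n, base, m):
--     # binary (MSB-first) doubling: carry (repunit mod m, base^k mod m) per bit of n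
--     r, pw = 0, 1 % m
--     for bit in format(n, "b"):
--         r = (r * pw + r) % m
--         pw = pw * pw % m
--         if bit == "1":
--             r = (r * base + 1) % m
--             pw = pw * base % m
--     return r
-- ===== Notes on version B (the rewrite author's own statement) =====
-- stated objective: faster
-- what changed: Replaces A's log-depth recursion whose even step calls an O(n) linear modular-power loop by a single iterative MSB-first binary-doubling pass over the bits of n that carries the pair (repunit mod m, base^k mod m), eliminating pow_ entirely.
-- outside the precondition, e.g. on f(0, 0, 0): A returns 0, B raises ZeroDivisionError
import Mathlib
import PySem

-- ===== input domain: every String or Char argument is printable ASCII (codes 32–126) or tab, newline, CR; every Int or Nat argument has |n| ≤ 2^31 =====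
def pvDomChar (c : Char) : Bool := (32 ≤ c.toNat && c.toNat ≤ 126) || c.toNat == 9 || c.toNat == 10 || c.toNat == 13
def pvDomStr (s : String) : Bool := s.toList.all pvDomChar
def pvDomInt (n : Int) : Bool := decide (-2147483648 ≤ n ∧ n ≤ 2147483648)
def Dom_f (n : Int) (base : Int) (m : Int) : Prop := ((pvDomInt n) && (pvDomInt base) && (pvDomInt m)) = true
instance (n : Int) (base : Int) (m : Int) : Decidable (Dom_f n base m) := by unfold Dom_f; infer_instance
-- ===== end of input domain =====

-- B replaces A's O(n) modular-power loop and unary-step recursion by a single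
-- MSB-first binary-doubling pass carrying (repunit mod m, base^k mod m): faster (asymptotic).


-- ===== PORT A =====
-- pow_(x, p, m): a = 1; for _ in range(p): a *= x % m; a %= m; return a
def pow_ (x : Int) (p : Int) (m : Int) : Int :=
  (PySem.List.pyRange 0 p 1).foldl (fun a _ => PySem.Int.mod (a * PySem.Int.mod x m) m) 1

-- f of Source A; the guard 'n ≤ 0' (in place of Python's 'n == 0') makes the recursion total:
-- Python returns 0 exactly at n = 0 and recurses forever for n < 0 (excluded by Pre_f).
def f (n : Int) (base : Int) (m : Int) : Int :=
  if _h0 : n ≤ 0 then 0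
  else if PySem.Int.mod n 2 = 1 then
    PySem.Int.mod (f (n - 1) base m * base + 1) m
  else
    let tmp := f (PySem.Int.floordiv n 2) base m
    PySem.Int.mod (tmp * pow_ base (PySem.Int.floordiv n 2) m + tmp) m
termination_by n.toNat
decreasing_by
  · omega
  · have h2 : PySem.Int.floordiv n 2 = n / 2 := PySem.Int.floordiv_eq_ediv_of_pos (by omega)
    rw [h2]; omega

-- ===== PORT B =====
-- the binary digits of k, MSB first: what Source B's 'for bit in format(n, "b")' iterates over (n ≥ 0)
def bitsOf (k : Nat) : List Bool :=
  if k ≤ 1 then [k == 1]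
  else bitsOf (k / 2) ++ [k % 2 == 1]

-- one iteration of Source B's loop body on the state (r, pw)
def stepB (base : Int) (m : Int) (s : Int × Int) (bit : Bool) : Int × Int :=
  let r := PySem.Int.mod (s.1 * s.2 + s.1) m
  let pw := PySem.Int.mod (s.2 * s.2) m
  if bit then (PySem.Int.mod (r * base + 1) m, PySem.Int.mod (pw * base) m)
  else (r, pw)

-- format(n, "b") for n < 0 is '-' followed by the digits of |n|; the '-' char is a non-'1' bit
def f_alt (n : Int) (base : Int) (m : Int) : Int :=
  ((if n < 0 then false :: bitsOf n.natAbs else bitsOf n.toNat).foldl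
      (stepB base m) (0, PySem.Int.mod 1 m)).1

-- ===== PRECONDITION & SPEC =====
-- Pre_f excludes n < 0 (A's recursion never terminates: RecursionError) and m = 0, on which
-- A raises ZeroDivisionError except at the degenerate n = 0 (returned before any '%'), where
-- B's own '1 % m' naturally raises instead.
def Pre_f (n : Int) (base : Int) (m : Int) : Prop := 0 ≤ n ∧ m ≠ 0
instance (n : Int) (base : Int) (m : Int) : Decidable (Pre_f n base m) := by unfold Pre_f; infer_instance
def pvWitness_f : Int × Int × Int := (10, 7, 5)

def Spec_f (n : Int) (base : Int) (m : Int) (out : Int) : Prop := out = f_alt n base m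
instance (n : Int) (base : Int) (m : Int) (out : Int) : Decidable (Spec_f n base m out) := by unfold Spec_f; infer_instance

-- ===== CLAIM (what is proved, stated in full; the proofs are below) =====
def Claim_equal_f : Prop := ∀ (n : Int) (base : Int) (m : Int), Dom_f n base m → Pre_f n base m → Spec_f n base m (f n base m)

-- ===== LEMMAS AND PROOFS =====

-- Python's floor-mod (Int.fmod) respects modular congruence, stated via emod equality
lemma fmod_congr {a b : Int} (m : Int) (h : a % m = b % m) : Int.fmod a m = Int.fmod b m := by
  have hd : m ∣ a ↔ m ∣ b := by
    rw [Int.dvd_iff_emod_eq_zero, Int.dvd_iff_emod_eq_zero, h]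
  rw [Int.fmod_eq_emod, Int.fmod_eq_emod, h]
  by_cases hb : (0:Int) ≤ m
  · simp [hb]
  · simp [hb, hd]

lemma emod_fmod (a m : Int) : (Int.fmod a m) % m = a % m := by
  rw [Int.fmod_eq_emod]
  split_ifs with h
  · simp
  · simp [Int.add_emod_right]

lemma fmod_mul_fmod (a b m : Int) :
    Int.fmod (Int.fmod a m * Int.fmod b m) m = Int.fmod (a * b) m := by
  apply fmod_congr
  rw [Int.mul_emod, emod_fmod, emod_fmod, ← Int.mul_emod]

-- pow_ computes x^k mod m for k ≥ 1 (at k = 0 it returns the literal 1; A only calls it with k ≥ 1)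
lemma pow_correct (x m : Int) (k : Nat) (hk : 1 ≤ k) :
    pow_ x (k : Int) m = Int.fmod (x ^ k) m := by
  induction k with
  | zero => omega
  | succ j ih =>
    rcases Nat.eq_or_lt_of_le hk with h1 | h1
    · have : j = 0 := by omega
      subst this
      show pow_ x (1:Int) m = _
      simp [pow_, PySem.Int.mod]
      exact fmod_congr m (by rw [one_mul, emod_fmod])
    · have hj : 1 ≤ j := by omega
      unfold pow_
      rw [show ((j+1 : Nat) : Int) = (j : Int) + 1 by push_cast; ring,
          PySem.List.pyRange_one_succ_right (by positivity)]
      rw [List.foldl_append]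
      have := ih hj
      unfold pow_ at this
      rw [this]
      simp only [List.foldl, PySem.Int.mod]
      apply fmod_congr
      rw [Int.mul_emod, emod_fmod, emod_fmod, ← Int.mul_emod, pow_succ]

lemma mod_two_cast (j : Nat) : PySem.Int.mod ((j:Nat) : Int) 2 = ((j % 2 : Nat) : Int) := by
  rw [PySem.Int.mod_eq_emod_of_pos (by omega)]; omega

lemma floordiv_two_cast (j : Nat) : PySem.Int.floordiv ((j:Nat) : Int) 2 = ((j / 2 : Nat) : Int) := by
  rw [PySem.Int.floordiv_eq_ediv_of_pos (by omega)]; omega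

lemma f_zero (base m : Int) : f 0 base m = 0 := by rw [f]; simp

-- unfolding of the A-port at a positive even argument
lemma f_even (j : Nat) (base m : Int) (hj : 1 ≤ j) :
    f ((2 * j : Nat) : Int) base m =
      Int.fmod (f (j : Int) base m * pow_ base (j : Int) m + f (j : Int) base m) m := by
  rw [f]
  have h1 : ¬ ((2 * j : Nat) : Int) ≤ 0 := by push_cast; omega
  have h2 := mod_two_cast (2 * j)
  have h3 := floordiv_two_cast (2 * j)
  simp only [h1, dite_false, h2, h3, Nat.mul_mod_right, Nat.cast_zero,
    Nat.mul_div_cancel_left _ (by omega : 0 < 2)]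
  simp [PySem.Int.mod]

-- unfolding of the A-port at an odd argument
lemma f_odd (j : Nat) (base m : Int) :
    f ((2 * j + 1 : Nat) : Int) base m =
      Int.fmod (f ((2 * j : Nat) : Int) base m * base + 1) m := by
  rw [f]
  have h1 : ¬ ((2 * j + 1 : Nat) : Int) ≤ 0 := by push_cast; omega
  have h2 := mod_two_cast (2 * j + 1)
  simp only [h1, dite_false, h2]
  have : (2 * j + 1) % 2 = 1 := by omega
  rw [this]
  norm_num [PySem.Int.mod]

lemma bitsOf_ge_two (k : Nat) (h : 2 ≤ k) : bitsOf k = bitsOf (k / 2) ++ [k % 2 == 1] := by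
  rw [bitsOf]; simp [show ¬ k ≤ 1 by omega]

lemma pw_sq (base m : Int) (j : Nat) :
    Int.fmod (Int.fmod (base ^ j) m * Int.fmod (base ^ j) m) m = Int.fmod (base ^ (2 * j)) m := by
  rw [fmod_mul_fmod, ← pow_add]
  congr 2; omega

-- the loop invariant of B: after the bits of k the state is (f k, base^k mod m)
lemma loop_invariant (base m : Int) (k : Nat) :
    (bitsOf k).foldl (stepB base m) (0, PySem.Int.mod 1 m)
      = (f (k : Int) base m, Int.fmod (base ^ k) m) := by
  induction k using Nat.strong_induction_on with
  | _ k ih =>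
  by_cases hk : k ≤ 1
  · interval_cases k
    · rw [show bitsOf 0 = [false] by rw [bitsOf]; rfl]
      simp only [List.foldl, stepB, PySem.Int.mod, Bool.false_eq_true, if_false, Nat.cast_zero]
      rw [f_zero, Prod.mk.injEq, pow_zero, fmod_mul_fmod]
      norm_num
    · rw [show bitsOf 1 = [true] by rw [bitsOf]; rfl]
      simp only [List.foldl, stepB, PySem.Int.mod, if_true]
      rw [Prod.mk.injEq, fmod_mul_fmod]
      norm_num
      constructor
      · have h := f_odd 0 base m
        norm_num [f_zero] at h
        rw [h]
      · apply fmod_congr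
        rw [Int.mul_emod, emod_fmod, ← Int.mul_emod]
        norm_num
  · obtain ⟨j, hj1, hcase⟩ : ∃ j, 1 ≤ j ∧ (k = 2*j ∨ k = 2*j+1) := ⟨k/2, by omega, by omega⟩
    have hdiv : k / 2 = j := by omega
    rw [bitsOf_ge_two k (by omega), List.foldl_append, hdiv, ih j (by omega)]
    rcases hcase with hk2 | hk2 <;> subst hk2
    · have hbit : (2*j % 2 == 1) = false := by simp [Nat.mul_mod_right]
      simp only [List.foldl, hbit, stepB, Bool.false_eq_true, if_false]
      rw [Prod.mk.injEq]
      refine ⟨?_, ?_⟩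
      · rw [f_even j base m hj1, pow_correct base m j hj1]
        simp [PySem.Int.mod]
      · simp only [PySem.Int.mod]
        exact pw_sq base m j
    · have hbit : ((2*j+1) % 2 == 1) = true := by simp
      simp only [List.foldl, hbit, stepB, if_true]
      rw [Prod.mk.injEq]
      refine ⟨?_, ?_⟩
      · rw [f_odd j base m, f_even j base m hj1, pow_correct base m j hj1]
        simp [PySem.Int.mod]
      · simp only [PySem.Int.mod]
        rw [pw_sq]
        apply fmod_congr
        rw [Int.mul_emod, emod_fmod, ← Int.mul_emod, ← pow_succ]

-- ===== VERDICT (by name: the statement is the Claim_ definition above) =====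
theorem f_spec : Claim_equal_f := by
  intro n base m _ hpre
  unfold Spec_f f_alt
  obtain ⟨hn, -⟩ := hpre
  rw [if_neg (by omega), loop_invariant base m n.toNat]
  simp [Int.toNat_of_nonneg hn]
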